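-- pv_equiv track=rewrite | github.com/azmainamin/leetcode | Amazon_MaxSustainableCluster.py | findMaximumSustainableClusterSize
-- ===== SOURCE A (Python) =====
-- def findMaximumSustainableClusterSize(processingPower, bootingPower, powerMax):
--     """
--     ids -> 1,2,3
--     power -> power[i]
--     can only cluser subsequent porcessors
--     seems like a sliding window problem
--     """
--
--     window_start = 0
--     max_cluster = 0
--
--     for window_end in range(len(processingPower)):
--         total_power = calculateTotalPower(window_start, window_end,processingPower, bootingPower)
--         if total_power <= powerMax:
--             max_cluster = max(max_cluster, window_end-window_start +1)
--         else:
--             window_start += 1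
--
--     return max_cluster
--
-- def calculateTotalPower(start, end, processingPower, bootingPower):
--     max_bp = max(bootingPower[start: end+1]) #probably why this is timing out, slicing
--     bp = sum(processingPower[start:end+1]) * (end-start +1)
--
--     return max_bp + bp
-- ===== SOURCE B (Python) =====
-- def findMaximumSustainableClusterSize(processingPower, bootingPower, powerMax):
--     # One pass: the window never shrinks (it slides by one on failure), so the
--     # answer is the final window size.  Running sum + a max-queue built from two
--     # stacks (amortised O(1) sliding-window maximum) replace A's per-step slices.
--     size = 0
--     total = 0
--     back = []   # (procPower, bootPower, running max of bootPower in this stack)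
--     front = []
--     for pv, bv in zip(processingPower, bootingPower):
--         total += pv
--         size += 1
--         back.append((pv, bv, bv if not back else max(bv, back[-1][2])))
--         m = back[-1][2] if not front else max(front[-1][2], back[-1][2])
--         if m + total * size > powerMax:
--             if not front:
--                 while back:
--                     q = back.pop()
--                     front.append((q[0], q[1], q[1] if not front else max(q[1], front[-1][2])))
--             total -= front.pop()[0]
--             size -= 1
--     return size
-- ===== Notes on version B (the rewrite author's own statement) =====
-- stated objective: faster
-- what changed: Replaces A's per-step slicing (recomputing the window's sum and max from scratch each iteration) with a single pass that keeps a running sum and a two-stack amortised-O(1) max-queue, and returns the final window size (the window never shrinks, so the final size is the maximum recorded).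
-- outside the precondition, e.g. on findMaximumSustainableClusterSize([1, 2], [5], 100): A returns 2, B returns 1
import Mathlib
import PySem

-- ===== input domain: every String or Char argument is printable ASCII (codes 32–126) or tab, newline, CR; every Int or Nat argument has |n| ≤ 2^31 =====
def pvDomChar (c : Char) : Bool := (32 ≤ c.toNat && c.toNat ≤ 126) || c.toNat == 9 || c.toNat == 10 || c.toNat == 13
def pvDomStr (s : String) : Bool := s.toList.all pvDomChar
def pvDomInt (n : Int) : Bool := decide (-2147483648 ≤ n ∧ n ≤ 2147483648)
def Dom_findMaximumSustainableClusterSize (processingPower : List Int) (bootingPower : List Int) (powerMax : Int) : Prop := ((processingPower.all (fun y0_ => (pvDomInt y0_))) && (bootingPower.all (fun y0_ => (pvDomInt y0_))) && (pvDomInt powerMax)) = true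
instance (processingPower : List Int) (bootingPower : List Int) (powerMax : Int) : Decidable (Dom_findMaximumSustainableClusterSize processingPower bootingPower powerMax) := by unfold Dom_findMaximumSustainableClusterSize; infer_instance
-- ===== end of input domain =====

-- B replaces A's per-step window slicing by a one-pass running sum plus a two-stack max-queue
-- and returns the final window size; objective: faster.

-- ===== PORT A =====
def calculateTotalPower (start «end» : Int) (processingPower bootingPower : List Int) : Int :=
  -- Python's max() raises ValueError on an empty slice; Pre_ keeps those inputs out (the .getD 0 is unreachable there)
  let max_bp := (PySem.List.max? (PySem.List.slice bootingPower (some start) (some («end» + 1))) id).getD 0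
  let bp := (PySem.List.slice processingPower (some start) (some («end» + 1))).sum * («end» - start + 1)
  max_bp + bp

def findMaximumSustainableClusterSize (processingPower : List Int) (bootingPower : List Int) (powerMax : Int) : Int :=
  ((PySem.List.pyRange 0 (processingPower.length : Int) 1).foldl
    (fun (st : Int × Int) window_end =>
      let total_power := calculateTotalPower st.1 window_end processingPower bootingPower
      if total_power ≤ powerMax then (st.1, max st.2 (window_end - st.1 + 1))
      else (st.1 + 1, st.2))
    (0, 0)).2

-- ===== PORT B =====
-- stacks grow at the head (Python list end = Lean list head); entries are (procPower, bootPower, running max of bootPower)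
def pvTopM (st : List (Int × Int × Int)) (d : Int) : Int :=
  match st with
  | [] => d                -- Python's st[-1][2] would raise IndexError; every use below is on a nonempty stack
  | (_, _, m) :: _ => m

def pvPush (pv bv : Int) (st : List (Int × Int × Int)) : List (Int × Int × Int) :=
  (pv, bv, match st with | [] => bv | (_, _, m) :: _ => max bv m) :: st

def pvFlush : List (Int × Int × Int) → List (Int × Int × Int) → List (Int × Int × Int)
  | [], front => front
  | (pv, bv, _) :: rest, front => pvFlush rest (pvPush pv bv front)

def pvStepB (powerMax : Int) (st : Int × Int × List (Int × Int × Int) × List (Int × Int × Int))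
    (x : Int × Int) : Int × Int × List (Int × Int × Int) × List (Int × Int × Int) :=
  let size := st.1 + 1
  let total := st.2.1 + x.1
  let back := pvPush x.1 x.2 st.2.2.1
  let front := st.2.2.2
  let m := match front with
    | [] => pvTopM back 0
    | (_, _, mf) :: _ => max mf (pvTopM back 0)
  if m + total * size > powerMax then
    match front with
    | [] =>
      match pvFlush back [] with
      | [] => (size, total, [], [])      -- unreachable: back was just pushed, so the flushed front is nonempty
      | (pv, _, _) :: ft => (size - 1, total - pv, [], ft)
    | (pv, _, _) :: ft => (size - 1, total - pv, back, ft)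
  else (size, total, back, front)

def findMaximumSustainableClusterSize_alt (processingPower : List Int) (bootingPower : List Int) (powerMax : Int) : Int :=
  ((processingPower.zip bootingPower).foldl (pvStepB powerMax) (0, 0, [], [])).1

-- ===== PRECONDITION & SPEC =====
-- Pre_ excludes inputs where bootingPower is shorter than processingPower: there A either raises
-- ValueError (max of an empty slice once the window start passes the end of bootingPower) or returns
-- a value that depends on the silently truncated slice; B pairs the two lists elementwise instead.
def Pre_findMaximumSustainableClusterSize (processingPower : List Int) (bootingPower : List Int) (powerMax : Int) : Prop :=
  processingPower.length ≤ bootingPower.length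
instance (processingPower : List Int) (bootingPower : List Int) (powerMax : Int) : Decidable (Pre_findMaximumSustainableClusterSize processingPower bootingPower powerMax) := by unfold Pre_findMaximumSustainableClusterSize; infer_instance

def pvWitness_findMaximumSustainableClusterSize : List Int × List Int × Int := ([1, 2], [5, 1], 100)

def Spec_findMaximumSustainableClusterSize (processingPower : List Int) (bootingPower : List Int) (powerMax : Int) (out : Int) : Prop := out = findMaximumSustainableClusterSize_alt processingPower bootingPower powerMax
instance (processingPower : List Int) (bootingPower : List Int) (powerMax : Int) (out : Int) : Decidable (Spec_findMaximumSustainableClusterSize processingPower bootingPower powerMax out) := by unfold Spec_findMaximumSustainableClusterSize; infer_instance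

-- ===== CLAIM (what is proved, stated in full; the proofs are below) =====
def Claim_equal_findMaximumSustainableClusterSize : Prop := ∀ (processingPower : List Int) (bootingPower : List Int) (powerMax : Int), Dom_findMaximumSustainableClusterSize processingPower bootingPower powerMax → Pre_findMaximumSustainableClusterSize processingPower bootingPower powerMax → Spec_findMaximumSustainableClusterSize processingPower bootingPower powerMax (findMaximumSustainableClusterSize processingPower bootingPower powerMax)

-- ===== LEMMAS AND PROOFS =====

def pvPairs (st : List (Int × Int × Int)) : List (Int × Int) := st.map (fun t => (t.1, t.2.1))

def goodStack : List (Int × Int × Int) → Prop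
  | [] => True
  | (_, bv, m) :: rest => m = max bv (pvTopM rest bv) ∧ goodStack rest

lemma pvPairs_append (s t : List (Int × Int × Int)) : pvPairs (s ++ t) = pvPairs s ++ pvPairs t :=
  List.map_append ..

lemma pvPairs_reverse (s : List (Int × Int × Int)) : pvPairs s.reverse = (pvPairs s).reverse :=
  List.map_reverse ..

lemma pvPairs_push (pv bv : Int) (st : List (Int × Int × Int)) :
    pvPairs (pvPush pv bv st) = (pv, bv) :: pvPairs st := rfl

lemma goodStack_tail (a : Int × Int × Int) (rest : List (Int × Int × Int))
    (h : goodStack (a :: rest)) : goodStack rest := by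
  obtain ⟨_, bv, m⟩ := a
  exact h.2

lemma goodStack_push (pv bv : Int) (st : List (Int × Int × Int)) (h : goodStack st) :
    goodStack (pvPush pv bv st) := by
  cases st with
  | nil => simp [pvPush, goodStack, pvTopM]
  | cons a rest =>
    obtain ⟨q1, q2, q3⟩ := a
    exact ⟨rfl, h⟩

lemma pvTopM_ub (st : List (Int × Int × Int)) (d : Int) (h : goodStack st) :
    ∀ y ∈ st.map (fun t => t.2.1), y ≤ pvTopM st d := by
  induction st generalizing d with
  | nil => simp
  | cons a rest ih =>
    obtain ⟨pv, bv, m⟩ := a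
    obtain ⟨hm, hrest⟩ := h
    intro y hy
    simp only [List.map_cons, List.mem_cons] at hy
    have htop : pvTopM ((pv, bv, m) :: rest) d = m := rfl
    rw [htop]
    rcases hy with rfl | hy
    · subst hm; exact le_max_left _ _
    · have := ih bv hrest y hy
      subst hm; exact le_trans this (le_max_right _ _)

lemma pvTopM_mem (st : List (Int × Int × Int)) (d : Int) (h : goodStack st) (hne : st ≠ []) :
    pvTopM st d ∈ st.map (fun t => t.2.1) := by
  induction st generalizing d with
  | nil => exact absurd rfl hne
  | cons a rest ih =>
    obtain ⟨pv, bv, m⟩ := a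
    obtain ⟨hm, hrest⟩ := h
    have htop : pvTopM ((pv, bv, m) :: rest) d = m := rfl
    rw [htop]
    simp only [List.map_cons, List.mem_cons]
    cases rest with
    | nil => left; simp [pvTopM] at hm; exact hm
    | cons a2 r2 =>
      rcases max_choice bv (pvTopM (a2 :: r2) bv) with hc | hc
      · left; rw [hm, hc]
      · right
        rw [hm, hc]
        exact ih bv hrest (by simp)

lemma pvFlush_pairs (back front : List (Int × Int × Int)) :
    pvPairs (pvFlush back front) = (pvPairs back).reverse ++ pvPairs front := by
  induction back generalizing front with
  | nil => simp [pvFlush, pvPairs]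
  | cons a rest ih =>
    obtain ⟨pv, bv, m⟩ := a
    rw [pvFlush, ih, pvPairs_push]
    simp [pvPairs]

lemma pvFlush_good (back front : List (Int × Int × Int)) (hf : goodStack front) :
    goodStack (pvFlush back front) := by
  induction back generalizing front with
  | nil => exact hf
  | cons a rest ih =>
    obtain ⟨pv, bv, m⟩ := a
    exact ih _ (goodStack_push pv bv front hf)

-- the maximum Source B reads off the two stack tops is the max of all bootPower values in the queue
def pvQM (front back : List (Int × Int × Int)) : Int :=
  match front with
  | [] => pvTopM back 0
  | (_, _, mf) :: _ => max mf (pvTopM back 0)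

lemma pvQM_spec (front back : List (Int × Int × Int))
    (hf : goodStack front) (hb : goodStack back) (hbne : back ≠ []) :
    pvQM front back ∈ (front ++ back.reverse).map (fun t => t.2.1) ∧
    ∀ y ∈ (front ++ back.reverse).map (fun t => t.2.1), y ≤ pvQM front back := by
  have hbmem := pvTopM_mem back 0 hb hbne
  have hbub := pvTopM_ub back 0 hb
  cases front with
  | nil =>
    constructor
    · simp only [pvQM, List.nil_append, List.map_reverse, List.mem_reverse]; exact hbmem
    · intro y hy
      simp only [List.nil_append, List.map_reverse, List.mem_reverse] at hy
      exact hbub y hy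
  | cons a ft =>
    obtain ⟨pv, bv, mf⟩ := a
    have hfmem := pvTopM_mem ((pv, bv, mf) :: ft) 0 hf (by simp)
    have hfub := pvTopM_ub ((pv, bv, mf) :: ft) 0 hf
    have htopf : pvTopM ((pv, bv, mf) :: ft) 0 = mf := rfl
    rw [htopf] at hfmem hfub
    constructor
    · rcases max_choice mf (pvTopM back 0) with hc | hc
      · simp only [pvQM, hc, List.map_append, List.mem_append]
        left; exact hfmem
      · simp only [pvQM, hc, List.map_append, List.mem_append, List.map_reverse, List.mem_reverse]
        right; exact hbmem
    · intro y hy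
      simp only [List.map_append, List.mem_append, List.map_reverse, List.mem_reverse] at hy
      rcases hy with hy | hy
      · exact le_trans (hfub y hy) (le_max_left _ _)
      · exact le_trans (hbub y hy) (le_max_right _ _)

lemma pvMaxGetD (L : List Int) (m : Int) (hm : m ∈ L) (hub : ∀ y ∈ L, y ≤ m) :
    (PySem.List.max? L id).getD 0 = m := by
  cases h : PySem.List.max? L id with
  | none =>
    rw [PySem.List.max?_eq_none_iff] at h
    subst h; simp at hm
  | some v =>
    have hvm : v ∈ L := PySem.List.max?_mem h
    have h1 : m ≤ v := PySem.List.max?_isMax h m hm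
    have h2 : v ≤ m := hub v hvm
    simp [le_antisymm h2 h1]

-- reduction lemmas for one step of B
lemma pvStepB_le (pm size total : Int) (back front : List (Int × Int × Int)) (x : Int × Int)
    (h : pvQM front (pvPush x.1 x.2 back) + (total + x.1) * (size + 1) ≤ pm) :
    pvStepB pm (size, total, back, front) x = (size + 1, total + x.1, pvPush x.1 x.2 back, front) := by
  cases front with
  | nil =>
    simp only [pvQM] at h
    simp only [pvStepB]
    rw [if_neg (not_lt.mpr h)]
  | cons f ft =>
    obtain ⟨pv1, bv1, m1⟩ := f
    simp only [pvQM] at h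
    simp only [pvStepB]
    rw [if_neg (not_lt.mpr h)]

lemma pvStepB_gt_cons (pm size total : Int) (back : List (Int × Int × Int))
    (pv1 bv1 m1 : Int) (ft : List (Int × Int × Int)) (x : Int × Int)
    (h : ¬ (pvQM ((pv1, bv1, m1) :: ft) (pvPush x.1 x.2 back) + (total + x.1) * (size + 1) ≤ pm)) :
    pvStepB pm (size, total, back, (pv1, bv1, m1) :: ft) x =
      (size, total + x.1 - pv1, pvPush x.1 x.2 back, ft) := by
  simp only [pvQM] at h
  simp only [pvStepB]
  rw [if_pos (not_le.mp h)]
  have hs : size + 1 - 1 = size := by ring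
  rw [hs]

lemma pvStepB_gt_nil (pm size total : Int) (back : List (Int × Int × Int)) (x : Int × Int)
    (pv2 bv2 m2 : Int) (ft2 : List (Int × Int × Int))
    (h : ¬ (pvQM [] (pvPush x.1 x.2 back) + (total + x.1) * (size + 1) ≤ pm))
    (hfl : pvFlush (pvPush x.1 x.2 back) [] = (pv2, bv2, m2) :: ft2) :
    pvStepB pm (size, total, back, []) x = (size, total + x.1 - pv2, [], ft2) := by
  simp only [pvQM] at h
  simp only [pvStepB]
  rw [if_pos (not_le.mp h), hfl]
  have hs : size + 1 - 1 = size := by ring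
  rw [hs]

-- main invariant: after k steps A's state is (ws, k - ws) and B's state is
-- (k - ws, sum of window procPowers, back, front) with the two stacks holding exactly the window
lemma pvMain (p b : List Int) (pm : Int) (hlen : p.length ≤ b.length) :
    ∀ k : Nat, k ≤ p.length →
    ∃ (ws : Nat) (back front : List (Int × Int × Int)),
      ws ≤ k ∧
      (PySem.List.pyRange 0 (k : Int) 1).foldl
        (fun (st : Int × Int) window_end =>
          let total_power := calculateTotalPower st.1 window_end p b
          if total_power ≤ pm then (st.1, max st.2 (window_end - st.1 + 1))
          else (st.1 + 1, st.2)) (0, 0) = ((ws : Int), (k : Int) - (ws : Int)) ∧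
      ((p.zip b).take k).foldl (pvStepB pm) (0, 0, [], []) =
        ((k : Int) - (ws : Int), (((((p.zip b).drop ws).take (k - ws)).map Prod.fst).sum), back, front) ∧
      pvPairs (front ++ back.reverse) = ((p.zip b).drop ws).take (k - ws) ∧
      goodStack back ∧ goodStack front := by
  intro k
  induction k with
  | zero =>
    intro _
    refine ⟨0, [], [], le_rfl, ?_, ?_, ?_, trivial, trivial⟩
    · simp [PySem.List.pyRange_one_eq_nil]
    · simp
    · simp [pvPairs]
  | succ k ih =>
    intro hk1
    have hk : k < p.length := hk1
    obtain ⟨ws, back, front, hws, hA, hB, hpairs, hgb, hgf⟩ := ih (le_of_lt hk)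
    have hkz : k < (p.zip b).length := by rw [List.length_zip]; omega
    have hwz : ws < (p.zip b).length := by omega
    have hkb : k < b.length := by omega
    have hpk : (p.zip b)[k] = (p[k], b[k]) := List.getElem_zip ..
    have hzws : (p.zip b)[ws] = (p[ws], b[ws]) := List.getElem_zip ..
    have hc1 : ((k + 1 : Nat) : Int) = (k : Int) + 1 := by push_cast; ring
    have hnat1 : k + 1 - ws = (k - ws) + 1 := by omega
    -- window notation
    set W := ((p.zip b).drop ws).take (k - ws) with hW
    set W1 := ((p.zip b).drop ws).take (k + 1 - ws) with hW1
    set W2 := ((p.zip b).drop (ws + 1)).take (k - ws) with hW2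
    have hW1eq : W1 = W ++ [(p[k], b[k])] := by
      rw [hW1, hnat1, List.take_succ, List.getElem?_drop]
      have : ws + (k - ws) = k := by omega
      rw [this, List.getElem?_eq_getElem hkz, hpk]
      rfl
    have hW1cons : W1 = (p[ws], b[ws]) :: W2 := by
      rw [hW1, hnat1, List.drop_eq_getElem_cons hwz, List.take_succ_cons, hzws]
    -- the processing-power side of the window is a slice of p
    have hfst : (p.zip b).map Prod.fst = p := List.map_fst_zip hlen
    have hWfst : W.map Prod.fst = (p.drop ws).take (k - ws) := by
      rw [hW, List.map_take, List.map_drop, hfst]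
    have hW1fst : W1.map Prod.fst = (p.drop ws).take (k + 1 - ws) := by
      rw [hW1, List.map_take, List.map_drop, hfst]
    -- the booting-power side of the window is a slice of b
    have hW1snd : W1.map Prod.snd = (b.drop ws).take (k + 1 - ws) := by
      apply List.ext_getElem
      · simp only [List.length_map, List.length_take, List.length_drop, hW1, List.length_zip]
        omega
      · intro i h1 h2
        simp only [hW1, List.getElem_map, List.getElem_take, List.getElem_drop, List.getElem_zip]
    -- A's slices
    have hsliceP : PySem.List.slice p (some (ws : Int)) (some ((k : Int) + 1)) =
        (p.drop ws).take (k + 1 - ws) := by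
      rw [← hc1, PySem.List.slice_natCast]
    have hsliceB : PySem.List.slice b (some (ws : Int)) (some ((k : Int) + 1)) =
        (b.drop ws).take (k + 1 - ws) := by
      rw [← hc1, PySem.List.slice_natCast]
    -- sums
    have hsumW1 : (W1.map Prod.fst).sum = ((W.map Prod.fst).sum) + p[k] := by
      rw [hW1eq]; simp
    -- the pushed back stack
    have hgb' : goodStack (pvPush p[k] b[k] back) := goodStack_push _ _ _ hgb
    have hbne' : pvPush p[k] b[k] back ≠ [] := by simp [pvPush]
    have hpairs' : pvPairs (front ++ (pvPush p[k] b[k] back).reverse) = W1 := by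
      rw [pvPairs_append, pvPairs_reverse, pvPairs_push, List.reverse_cons, hW1eq, ← hpairs,
        pvPairs_append, pvPairs_reverse, List.append_assoc]
    -- the two-stack maximum is the window maximum
    obtain ⟨hqmem, hqub⟩ := pvQM_spec front (pvPush p[k] b[k] back) hgf hgb' hbne'
    have hbvals : (front ++ (pvPush p[k] b[k] back).reverse).map (fun t => t.2.1) =
        (b.drop ws).take (k + 1 - ws) := by
      rw [← hW1snd, ← hpairs']
      simp only [pvPairs, List.map_append, List.map_reverse, List.map_map]
      rfl
    rw [hbvals] at hqmem hqub
    -- A's total power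
    have hct : calculateTotalPower (ws : Int) (k : Int) p b =
        pvQM front (pvPush p[k] b[k] back) +
          ((W.map Prod.fst).sum + p[k]) * ((k : Int) - (ws : Int) + 1) := by
      unfold calculateTotalPower
      rw [hsliceB, hsliceP, pvMaxGetD _ _ hqmem hqub, ← hW1fst, hsumW1]
    -- peel one step off A's fold
    have hAstep : (PySem.List.pyRange 0 ((k + 1 : Nat) : Int) 1).foldl
        (fun (st : Int × Int) window_end =>
          let total_power := calculateTotalPower st.1 window_end p b
          if total_power ≤ pm then (st.1, max st.2 (window_end - st.1 + 1))
          else (st.1 + 1, st.2)) (0, 0) =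
        (if calculateTotalPower (ws : Int) (k : Int) p b ≤ pm
         then ((ws : Int), max ((k : Int) - (ws : Int)) ((k : Int) - (ws : Int) + 1))
         else ((ws : Int) + 1, (k : Int) - (ws : Int))) := by
      rw [hc1, PySem.List.pyRange_one_succ_right (Int.natCast_nonneg k), List.foldl_append, hA]
      rfl
    -- peel one step off B's fold
    have hBstep : ((p.zip b).take (k + 1)).foldl (pvStepB pm) (0, 0, [], []) =
        pvStepB pm ((k : Int) - (ws : Int), (W.map Prod.fst).sum, back, front) (p[k], b[k]) := by
      rw [List.take_succ, List.getElem?_eq_getElem hkz, hpk, List.foldl_append, hB]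
      rfl
    have hidx : k + 1 - (ws + 1) = k - ws := by omega
    by_cases hcond : pvQM front (pvPush p[k] b[k] back) +
        ((W.map Prod.fst).sum + p[k]) * (((k : Int) - (ws : Int)) + 1) ≤ pm
    · -- condition holds: the window grows, nothing is popped
      refine ⟨ws, pvPush p[k] b[k] back, front, by omega, ?_, ?_, ?_, hgb', hgf⟩
      · rw [hAstep, hct, if_pos hcond]
        rw [max_eq_right (by linarith), hc1]
        congr 1
        ring
      · rw [hBstep, pvStepB_le pm _ _ back front (p[k], b[k]) hcond]
        rw [← hW1, hsumW1,
          show ((k + 1 : Nat) : Int) - (ws : Int) = ((k : Int) - (ws : Int)) + 1 from by push_cast; ring]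
      · rw [← hW1]; exact hpairs'
    · -- condition fails: the window slides by one
      have hAgoal : (if calculateTotalPower (ws : Int) (k : Int) p b ≤ pm
          then ((ws : Int), max ((k : Int) - (ws : Int)) ((k : Int) - (ws : Int) + 1))
          else ((ws : Int) + 1, (k : Int) - (ws : Int))) =
          (((ws + 1 : Nat) : Int), ((k + 1 : Nat) : Int) - ((ws + 1 : Nat) : Int)) := by
        rw [hct, if_neg hcond]
        push_cast
        congr 1 <;> ring
      cases front with
      | nil =>
        -- front stack empty: flush the back stack, then pop
        have hflpairs : pvPairs (pvFlush (pvPush p[k] b[k] back) []) = W1 := by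
          rw [pvFlush_pairs]
          simpa [pvPairs] using hpairs'
        have hflgood : goodStack (pvFlush (pvPush p[k] b[k] back) []) :=
          pvFlush_good _ _ trivial
        cases hfl : pvFlush (pvPush p[k] b[k] back) [] with
        | nil =>
          rw [hfl, hW1cons] at hflpairs
          simp [pvPairs] at hflpairs
        | cons f2 ft2 =>
          obtain ⟨pv2, bv2, m2⟩ := f2
          rw [hfl] at hflpairs hflgood
          rw [hW1cons] at hflpairs
          simp only [pvPairs, List.map_cons, List.cons.injEq, Prod.mk.injEq] at hflpairs
          obtain ⟨⟨hpv2, hbv2⟩, hft2⟩ := hflpairs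
          have hsum2 : (W2.map Prod.fst).sum = (W.map Prod.fst).sum + p[k] - pv2 := by
            have hcat : ((p[ws], b[ws]) : Int × Int) :: W2 = W ++ [(p[k], b[k])] :=
              hW1cons.symm.trans hW1eq
            have h' := congrArg (fun l => (List.map Prod.fst l).sum) hcat
            simp only [List.map_cons, List.sum_cons, List.map_append, List.sum_append,
              List.map_nil, List.sum_nil] at h'
            rw [hpv2]
            linarith [h']
          refine ⟨ws + 1, [], ft2, by omega, ?_, ?_, ?_, trivial, goodStack_tail _ _ hflgood⟩
          · rw [hAstep]; exact hAgoal
          · rw [hBstep, pvStepB_gt_nil pm _ _ back (p[k], b[k]) pv2 bv2 m2 ft2 hcond hfl]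
            rw [hidx, ← hW2, hsum2,
              show ((k + 1 : Nat) : Int) - ((ws + 1 : Nat) : Int) = (k : Int) - (ws : Int) from by push_cast; ring]
          · rw [hidx, ← hW2]
            simpa [pvPairs] using hft2
      | cons f ft =>
        obtain ⟨pv1, bv1, m1⟩ := f
        have hsplit : pvPairs (((pv1, bv1, m1) :: ft) ++ (pvPush p[k] b[k] back).reverse) =
            (p[ws], b[ws]) :: W2 := by
          rw [hpairs', hW1cons]
        simp only [pvPairs, List.cons_append, List.map_cons, List.cons.injEq, Prod.mk.injEq] at hsplit
        obtain ⟨⟨hpv1, hbv1⟩, hft1⟩ := hsplit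
        have hsum2 : (W2.map Prod.fst).sum = (W.map Prod.fst).sum + p[k] - pv1 := by
          have hcat : ((p[ws], b[ws]) : Int × Int) :: W2 = W ++ [(p[k], b[k])] :=
            hW1cons.symm.trans hW1eq
          have h' := congrArg (fun l => (List.map Prod.fst l).sum) hcat
          simp only [List.map_cons, List.sum_cons, List.map_append, List.sum_append,
            List.map_nil, List.sum_nil] at h'
          rw [hpv1]
          linarith [h']
        refine ⟨ws + 1, pvPush p[k] b[k] back, ft, by omega, ?_, ?_, ?_, hgb',
          goodStack_tail _ _ hgf⟩
        · rw [hAstep]; exact hAgoal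
        · rw [hBstep, pvStepB_gt_cons pm _ _ back pv1 bv1 m1 ft (p[k], b[k]) hcond]
          rw [hidx, ← hW2, hsum2,
            show ((k + 1 : Nat) : Int) - ((ws + 1 : Nat) : Int) = (k : Int) - (ws : Int) from by push_cast; ring]
        · rw [hidx, ← hW2]
          simpa [pvPairs] using hft1

-- ===== VERDICT (by name: the statement is the Claim_ definition above) =====
theorem findMaximumSustainableClusterSize_spec : Claim_equal_findMaximumSustainableClusterSize := by
  intro p b pm _hdom hpre
  unfold Pre_findMaximumSustainableClusterSize at hpre
  obtain ⟨ws, back, front, hws, hA, hB, -, -, -⟩ := pvMain p b pm hpre p.length le_rfl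
  have hzlen : (p.zip b).length = p.length := by
    rw [List.length_zip]; omega
  have hztake : (p.zip b).take p.length = p.zip b := by
    rw [← hzlen, List.take_length]
  rw [hztake] at hB
  unfold Spec_findMaximumSustainableClusterSize
  unfold findMaximumSustainableClusterSize findMaximumSustainableClusterSize_alt
  rw [hA, hB]
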